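-- pv_equiv track=rewrite | github.com/VolaDynamics/vtz | etc/scripts/docgen.py | trim_to_initial_indent
-- ===== SOURCE A (Python) =====
-- def trim_to_initial_indent(lines):
--     """Trim a code block based on the first line's indentation.
--
--     The first non-blank line's indent sets the base. The block stops at
--     any subsequent non-blank line that is less-indented than the base.
--     """
--     base_indent = None
--     for line in lines:
--         if line.strip():
--             base_indent = len(line) - len(line.lstrip())
--             break
--     if base_indent is None:
--         return lines
--     result = []
--     for line in lines:
--         if line.strip() and (len(line) - len(line.lstrip())) < base_indent:
--             break
--         result.append(line)
--     while result and not result[-1].strip():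
--         result.pop()
--     return result
-- ===== SOURCE B (Python) =====
-- def trim_to_initial_indent(lines):
--     """Single pass: find the base indent, stop at the first less-indented
--     non-blank line, and remember the index of the last non-blank line kept;
--     trailing blanks are then excluded by the slice bound."""
--     base_indent = None
--     last = -1
--     for i, line in enumerate(lines):
--         if line.strip():
--             indent = len(line) - len(line.lstrip())
--             if base_indent is None:
--                 base_indent = indent
--             elif indent < base_indent:
--                 break
--             last = i
--     if base_indent is None:
--         return lines
--     return lines[:last + 1]
-- ===== Notes on version B (the rewrite author's own statement) =====
-- stated objective: simpler
-- what changed: Replaced A's three passes (scan for the base indent, second scan copying lines until the break, then popping trailing blanks) by one indexed pass that records the last non-blank index and returns a single slice lines[:last+1].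
import Mathlib
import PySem

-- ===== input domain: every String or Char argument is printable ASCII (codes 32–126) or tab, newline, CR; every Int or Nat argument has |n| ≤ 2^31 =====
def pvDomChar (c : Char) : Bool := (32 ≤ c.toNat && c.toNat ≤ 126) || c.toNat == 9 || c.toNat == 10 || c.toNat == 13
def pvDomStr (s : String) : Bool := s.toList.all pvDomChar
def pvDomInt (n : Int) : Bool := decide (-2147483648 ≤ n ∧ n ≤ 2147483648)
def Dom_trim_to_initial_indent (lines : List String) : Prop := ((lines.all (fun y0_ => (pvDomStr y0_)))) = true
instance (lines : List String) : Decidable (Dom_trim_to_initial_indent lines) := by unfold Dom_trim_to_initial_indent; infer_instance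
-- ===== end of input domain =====

-- B replaces A's three passes (find base, copy-until-break, pop trailing blanks) by one
-- indexed pass that records the last non-blank index and slices once (objective: simpler).

-- ===== PORT A =====
-- len(line) - len(line.lstrip())
def pvIndentA (line : String) : Int :=
  PySem.Str.len line - PySem.Str.len (PySem.Str.lstrip line)

-- first loop: find base_indent (break at first non-blank line)
def pvFindBaseA : List String → Option Int
  | [] => none
  | l :: ls => if PySem.Str.strip l ≠ "" then some (pvIndentA l) else pvFindBaseA ls

-- second loop: append lines until a non-blank line is less indented than base
def pvTakeUntilA (b : Int) : List String → List String
  | [] => []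
  | l :: ls =>
      if PySem.Str.strip l ≠ "" ∧ pvIndentA l < b then []
      else l :: pvTakeUntilA b ls

-- while result and not result[-1].strip(): result.pop()
def pvPopTrailingA (r : List String) : List String :=
  (r.reverse.dropWhile (fun l => PySem.Str.strip l = "")).reverse

def trim_to_initial_indent (lines : List String) : List String :=
  match pvFindBaseA lines with
  | none => lines
  | some b => pvPopTrailingA (pvTakeUntilA b lines)

-- ===== PORT B =====
-- single indexed pass: returns (base_indent, last) as left by B's for-loop
def pvScanB : List String → Int → Option Int → Int → Option Int × Int
  | [], _, base, last => (base, last)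
  | l :: ls, i, base, last =>
      if PySem.Str.strip l ≠ "" then
        match base with
        | none => pvScanB ls (i + 1) (some (PySem.Str.len l - PySem.Str.len (PySem.Str.lstrip l))) i
        | some b =>
            if PySem.Str.len l - PySem.Str.len (PySem.Str.lstrip l) < b then (some b, last)
            else pvScanB ls (i + 1) (some b) i
      else pvScanB ls (i + 1) base last

def trim_to_initial_indent_alt (lines : List String) : List String :=
  match pvScanB lines 0 none (-1) with
  | (none, _) => lines
  | (some _, last) => PySem.List.slice lines none (some (last + 1))

-- ===== PRECONDITION & SPEC =====
def Spec_trim_to_initial_indent (lines : List String) (out : List String) : Prop := out = trim_to_initial_indent_alt lines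
instance (lines : List String) (out : List String) : Decidable (Spec_trim_to_initial_indent lines out) := by unfold Spec_trim_to_initial_indent; infer_instance

-- ===== CLAIM (what is proved, stated in full; the proofs are below) =====
def Claim_equal_trim_to_initial_indent : Prop := ∀ (lines : List String), Dom_trim_to_initial_indent lines → Spec_trim_to_initial_indent lines (trim_to_initial_indent lines)

-- ===== LEMMAS AND PROOFS =====

-- index (into xs) of the last non-blank line kept before A's break, if any
def pvLastNB (b : Int) : List String → Option Nat
  | [] => none
  | l :: ls =>
      if PySem.Str.strip l ≠ "" then
        if pvIndentA l < b then none
        else match pvLastNB b ls with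
             | none => some 0
             | some k => some (k + 1)
      else match pvLastNB b ls with
           | none => none
           | some k => some (k + 1)

theorem pvPopTrailingA_cons (l : String) (ys : List String) :
    pvPopTrailingA (l :: ys) =
      if pvPopTrailingA ys = [] then (if PySem.Str.strip l = "" then [] else [l])
      else l :: pvPopTrailingA ys := by
  unfold pvPopTrailingA
  rw [List.reverse_cons, List.dropWhile_append]
  by_cases h : (List.dropWhile (fun l => PySem.Str.strip l = "") ys.reverse) = []
  · simp [h, List.dropWhile]
    by_cases hs : PySem.Str.strip l = "" <;> simp [hs]
  · simp [h, List.isEmpty_iff, -List.dropWhile_eq_nil_iff]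

theorem pvA1 (b : Int) (xs : List String) :
    pvPopTrailingA (pvTakeUntilA b xs) =
      match pvLastNB b xs with
      | none => []
      | some k => xs.take (k + 1) := by
  induction xs with
  | nil => simp [pvTakeUntilA, pvLastNB, pvPopTrailingA]
  | cons l ls ih =>
    by_cases hs : PySem.Str.strip l ≠ ""
    · by_cases hlt : pvIndentA l < b
      · simp [pvTakeUntilA, pvLastNB, hs, hlt, pvPopTrailingA]
      · rw [pvTakeUntilA, if_neg (show ¬(PySem.Str.strip l ≠ "" ∧ pvIndentA l < b) by tauto),
            pvPopTrailingA_cons, ih,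
            pvLastNB, if_pos hs, if_neg hlt]
        cases h : pvLastNB b ls with
        | none => simp [hs]
        | some k =>
          have hne : List.take (k + 1) ls ≠ [] := by
            intro hnil
            cases ls with
            | nil => simp [pvLastNB] at h
            | cons a as => simp at hnil
          simp [hne]
    · rw [not_not] at hs
      rw [pvTakeUntilA, if_neg (show ¬(PySem.Str.strip l ≠ "" ∧ pvIndentA l < b) by simp [hs]),
          pvPopTrailingA_cons, ih,
          pvLastNB, if_neg (show ¬(PySem.Str.strip l ≠ "") by simp [hs])]
      cases h : pvLastNB b ls with
      | none => simp [hs]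
      | some k =>
        have hne : List.take (k + 1) ls ≠ [] := by
          intro hnil
          cases ls with
          | nil => simp [pvLastNB] at h
          | cons a as => simp at hnil
        simp [hne]

theorem pvB1 (b : Int) (xs : List String) : ∀ (i last : Int),
    pvScanB xs i (some b) last =
      (some b, match pvLastNB b xs with | none => last | some k => i + k) := by
  induction xs with
  | nil => intro i last; rfl
  | cons l ls ih =>
    intro i last
    by_cases hs : PySem.Str.strip l ≠ ""
    · by_cases hlt : pvIndentA l < b
      · rw [pvScanB, if_pos hs, if_pos (by simpa [pvIndentA] using hlt)]
        rw [pvLastNB, if_pos hs, if_pos hlt]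
      · rw [pvScanB, if_pos hs, if_neg (by simpa [pvIndentA] using hlt), ih]
        rw [pvLastNB, if_pos hs, if_neg hlt]
        cases h : pvLastNB b ls with
        | none => simp
        | some k => simp; ring
    · rw [not_not] at hs
      rw [pvScanB, if_neg (show ¬(PySem.Str.strip l ≠ "") by simp [hs]), ih]
      rw [pvLastNB, if_neg (show ¬(PySem.Str.strip l ≠ "") by simp [hs])]
      cases h : pvLastNB b ls with
      | none => simp
      | some k => simp; ring

theorem pvN1 (xs : List String) (h : pvFindBaseA xs = none) :
    ∀ (i last : Int), pvScanB xs i none last = (none, last) := by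
  induction xs with
  | nil => intro i last; rfl
  | cons l ls ih =>
    intro i last
    by_cases hs : PySem.Str.strip l ≠ ""
    · simp [pvFindBaseA, hs] at h
    · rw [not_not] at hs
      rw [pvFindBaseA, if_neg (show ¬(PySem.Str.strip l ≠ "") by simp [hs])] at h
      rw [pvScanB, if_neg (show ¬(PySem.Str.strip l ≠ "") by simp [hs]), ih h]

theorem pvB2 (xs : List String) (b : Int) (h : pvFindBaseA xs = some b) :
    ∀ (i last : Int),
    pvScanB xs i none last =
      (some b, match pvLastNB b xs with | none => last | some k => i + k) := by
  induction xs with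
  | nil => simp [pvFindBaseA] at h
  | cons l ls ih =>
    intro i last
    by_cases hs : PySem.Str.strip l ≠ ""
    · rw [pvFindBaseA, if_pos hs, Option.some_inj] at h
      subst h
      rw [pvScanB, if_pos hs]
      rw [show PySem.Str.len l - PySem.Str.len (PySem.Str.lstrip l) = pvIndentA l from rfl, pvB1]
      rw [pvLastNB, if_pos hs, if_neg (lt_irrefl _)]
      cases hk : pvLastNB (pvIndentA l) ls with
      | none => simp
      | some k => simp; ring
    · rw [not_not] at hs
      rw [pvFindBaseA, if_neg (show ¬(PySem.Str.strip l ≠ "") by simp [hs])] at h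
      rw [pvScanB, if_neg (show ¬(PySem.Str.strip l ≠ "") by simp [hs]), ih h]
      rw [pvLastNB, if_neg (show ¬(PySem.Str.strip l ≠ "") by simp [hs])]
      cases hk : pvLastNB b ls with
      | none => simp
      | some k => simp; ring

theorem pvS (xs : List String) (b : Int) (h : pvFindBaseA xs = some b) :
    ∃ k, pvLastNB b xs = some k := by
  induction xs with
  | nil => simp [pvFindBaseA] at h
  | cons l ls ih =>
    by_cases hs : PySem.Str.strip l ≠ ""
    · rw [pvFindBaseA, if_pos hs, Option.some_inj] at h
      subst h
      rw [pvLastNB, if_pos hs, if_neg (lt_irrefl _)]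
      cases hk : pvLastNB (pvIndentA l) ls with
      | none => exact ⟨0, rfl⟩
      | some k => exact ⟨k + 1, rfl⟩
    · rw [not_not] at hs
      rw [pvFindBaseA, if_neg (show ¬(PySem.Str.strip l ≠ "") by simp [hs])] at h
      obtain ⟨k, hk⟩ := ih h
      exact ⟨k + 1, by rw [pvLastNB, if_neg (show ¬(PySem.Str.strip l ≠ "") by simp [hs]), hk]⟩

-- ===== VERDICT (by name: the statement is the Claim_ definition above) =====
theorem trim_to_initial_indent_spec : Claim_equal_trim_to_initial_indent := by
  intro lines _
  unfold Spec_trim_to_initial_indent trim_to_initial_indent trim_to_initial_indent_alt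
  cases hb : pvFindBaseA lines with
  | none => rw [pvN1 lines hb]
  | some b =>
    obtain ⟨k, hk⟩ := pvS lines b hb
    have h1 : pvPopTrailingA (pvTakeUntilA b lines) = lines.take (k + 1) := by
      rw [pvA1, hk]
    have h2 : pvScanB lines 0 none (-1) = (some b, (k : Int)) := by
      rw [pvB2 lines b hb, hk]; norm_num
    rw [h2]
    show pvPopTrailingA (pvTakeUntilA b lines) = PySem.List.slice lines none (some ((k : Int) + 1))
    rw [h1, PySem.List.slice_to lines (by omega : (0:Int) ≤ (k : Int) + 1)]
    congr 1
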